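-- pv_equiv track=rewrite | github.com/coder11235/aoc-2021-coder11235 | solutions/day-25/soln1.py | move_east
-- ===== SOURCE A (Python) =====
-- def move_east(data: list[list[str]]):
--     in_motion = False
--     for ini, i in enumerate(data):
--         tmp = False
--         pf = False
--         for inj, j in enumerate(i):
--             if tmp:
--                 tmp = False
--                 continue
--             if j == '>':
--                 nxt = 0 if inj == (len(data[0])-1) else inj + 1
--                 if data[ini][nxt] == '.':
--                     if inj == (len(data[0])-1) and pf:
--                         continue
--                     data[ini][inj] = '.'
--                     data[ini][nxt] = '>'
--                     tmp = True
--                     in_motion = True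
--                     if inj == 0:
--                         pf = True
--     return in_motion
-- ===== SOURCE B (Python) =====
-- def move_east(data: list[list[str]]):
--     in_motion = False
--     w = len(data[0]) if data else 0
--     for row in data:
--         movable = [j for j in range(len(row))
--                    if row[j] == '>' and row[(j + 1) % w] == '.']
--         for j in movable:
--             row[j] = '.'
--             row[(j + 1) % w] = '>'
--         if movable:
--             in_motion = True
--     return in_motion
-- ===== Notes on version B (the rewrite author's own statement) =====
-- stated objective: simpler
-- what changed: Replaces A's single stateful scan with tmp/pf carry flags by a two-pass per-row scheme: a read-only scan of the original row collects all movable indices (row[j]=='>' and row[(j+1)%w]=='.'), then the moves are applied; reading originals gives simultaneous semantics without flags.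
-- outside the precondition, e.g. on move_east([[], ['>', '>', '.']]): A returns True, B raises ZeroDivisionError; on move_east([['>'], ['>', '>', '.', '.'], ['v', '>', '.']]): A returns True, B returns False
import Mathlib
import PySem

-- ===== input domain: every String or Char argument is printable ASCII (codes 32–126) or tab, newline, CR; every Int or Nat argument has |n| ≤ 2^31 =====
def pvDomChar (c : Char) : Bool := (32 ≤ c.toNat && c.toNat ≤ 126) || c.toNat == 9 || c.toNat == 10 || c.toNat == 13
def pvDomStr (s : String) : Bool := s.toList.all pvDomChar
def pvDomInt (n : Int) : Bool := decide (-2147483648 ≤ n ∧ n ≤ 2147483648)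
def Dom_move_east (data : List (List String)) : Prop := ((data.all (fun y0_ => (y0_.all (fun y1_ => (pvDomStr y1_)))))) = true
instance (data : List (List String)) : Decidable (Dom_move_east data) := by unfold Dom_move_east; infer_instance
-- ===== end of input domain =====

-- B replaces A's stateful single scan (tmp/pf carry flags) by a per-row read-only scan that
-- collects the movable indices from the original row, then applies the moves; equivalence is
-- about the RETURN value (both Pythons also perform the same in-place grid mutation on Pre_).


-- ===== PORT A =====
-- Inner loop of A over enumerate(i): state is the (mutated) row, the tmp and pf flags and
-- in_motion.  `List.getD _ ""` stands for Python's indexing; inside Pre_ every index read is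
-- in range (the out-of-range reads on ragged grids, where Python raises, are excluded by Pre_).
def moveEastLoopA (w : Nat) : List Nat → List String → Bool → Bool → Bool → Bool
  | [], _, _, _, inm => inm
  | inj :: rest, row, tmp, pf, inm =>
    if tmp then moveEastLoopA w rest row false pf inm
    else
      let j := row.getD inj ""
      if j == ">" then
        -- nxt = 0 if inj == (len(data[0])-1) else inj + 1   (compared over Int, as Python does)
        let nxt : Nat := if (inj : Int) = (w : Int) - 1 then 0 else inj + 1
        if row.getD nxt "" == "." then
          if ((inj : Int) = (w : Int) - 1) ∧ pf = true then
            moveEastLoopA w rest row tmp pf inm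
          else
            moveEastLoopA w rest ((row.set inj ".").set nxt ">") true
              (if inj = 0 then true else pf) true
        else moveEastLoopA w rest row tmp pf inm
      else moveEastLoopA w rest row tmp pf inm

def move_east (data : List (List String)) : Bool :=
  let w := (data.headD []).length
  data.foldl (fun inm row => moveEastLoopA w (List.range row.length) row false false inm) false

-- ===== PORT B =====
-- Per row: read-only scan of the ORIGINAL row collecting the movable indices; the in-place
-- writes of Source B mutate only the grid, never the returned flag, so they do not appear here.
def move_east_alt (data : List (List String)) : Bool :=
  let w := (data.headD []).length
  data.foldl (fun inm row =>
    let movable := (List.range row.length).filter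
      (fun j => row.getD j "" == ">" && row.getD ((j + 1) % w) "" == ".")
    if movable.isEmpty then inm else true) false

-- ===== PRECONDITION & SPEC =====
-- Pre_ excludes ragged grids that contain a ">" cell: A indexes every row with the FIRST row's
-- width, so on such grids it raises IndexError or returns an accidental value of that indexing
-- scheme; the rectangular grid is the function's natural domain (a grid with no ">" anywhere is
-- kept: both programs trivially return False without indexing).
def Pre_move_east (data : List (List String)) : Prop :=
  (∀ row ∈ data, row.length = (data.headD []).length) ∨
  (∀ row ∈ data, ∀ c ∈ row, c ≠ ">")
instance (data : List (List String)) : Decidable (Pre_move_east data) := by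
  unfold Pre_move_east; infer_instance

def pvWitness_move_east : List (List String) := [[">", ".", ">"], [".", "v", ">"]]

def Spec_move_east (data : List (List String)) (out : Bool) : Prop := out = move_east_alt data
instance (data : List (List String)) (out : Bool) : Decidable (Spec_move_east data out) := by
  unfold Spec_move_east; infer_instance

-- ===== CLAIM (what is proved, stated in full; the proofs are below) =====
def Claim_equal_move_east : Prop :=
  ∀ (data : List (List String)), Dom_move_east data → Pre_move_east data →
    Spec_move_east data (move_east data)

-- ===== LEMMAS AND PROOFS =====

-- "cucumber at j can move" judged on the ORIGINAL row (what B computes per row).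
def movB (orig : List String) (j : Nat) : Bool :=
  orig.getD j "" == ">" && orig.getD ((j + 1) % orig.length) "" == "."

lemma filter_isEmpty_eq_not_any {α : Type} (p : α → Bool) (l : List α) :
    (l.filter p).isEmpty = !l.any p := by
  induction l with
  | nil => rfl
  | cons a t ih => cases h : p a <;> simp [h, ih]

-- Loop invariant for A's scan of one (rectangular) row: at position k, the row agrees with the
-- original above k, position 0 is "." exactly if the cucumber at 0 already moved, and the tmp/pf
-- flags are determined by movB; the remaining scan contributes exactly "some movable j remains".
lemma moveEastLoopA_inv (orig : List String) :
    ∀ (n k : Nat) (row : List String) (tmp pf inm : Bool),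
      k + n = orig.length →
      row.length = orig.length →
      (∀ j, k < j → row.getD j "" = orig.getD j "") →
      (tmp = false → row.getD k "" = orig.getD k "") →
      row.getD 0 "" = (if 0 < k ∧ movB orig 0 = true then "." else orig.getD 0 "") →
      tmp = (decide (0 < k) && movB orig (k - 1)) →
      pf = (decide (0 < k) && movB orig 0) →
      moveEastLoopA orig.length (List.range' k n) row tmp pf inm
        = (inm || (List.range' k n).any (movB orig)) := by
  intro n
  induction n with
  | zero => intro k row tmp pf inm _ _ _ _ _ _ _; simp [moveEastLoopA]
  | succ n ih =>
    intro k row tmp pf inm hkn hlen h2 h3 h4 h5 h6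
    have hkw : k < orig.length := by omega
    rw [List.range'_succ]
    cases htmp : tmp with
    | true =>
      -- skip the cell just written; it is not movable in the original row
      have hk0 : 0 < k := by
        by_contra h
        rw [htmp] at h5
        simp [Nat.eq_zero_of_not_pos h] at h5
      have hmk1 : movB orig (k - 1) = true := by
        rw [htmp] at h5; simpa [hk0] using h5.symm
      have hdotk : orig.getD k "" = "." := by
        have h := hmk1
        unfold movB at h
        rw [Bool.and_eq_true] at h
        have h2' := h.2
        rwa [Nat.sub_add_cancel hk0, Nat.mod_eq_of_lt hkw, beq_iff_eq] at h2'
      have hmk : movB orig k = false := by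
        unfold movB; rw [hdotk]; simp
      simp only [moveEastLoopA, if_true]
      rw [ih (k + 1) row false pf inm (by omega) hlen
          (fun j hj => h2 j (by omega)) (fun _ => h2 (k + 1) (by omega))
          (by simpa [hk0] using h4)
          (by simp [hmk]) (by rw [h6]; simp [hk0])]
      simp [List.any_cons, hmk]
    | false =>
      have hrowk : row.getD k "" = orig.getD k "" := h3 htmp
      simp only [moveEastLoopA, Bool.false_eq_true, if_false]
      by_cases hgt : orig.getD k "" = ">"
      · simp only [hrowk, hgt, beq_self_eq_true, if_true]
        by_cases hke : k = orig.length - 1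
        · -- last column: wrap read of position 0
          have hn0 : n = 0 := by omega
          have hnxt : (if (k : Int) = (orig.length : Int) - 1 then 0 else k + 1) = 0 := by
            simp only [if_pos (by omega : (k : Int) = (orig.length : Int) - 1)]
          have hmod : (k + 1) % orig.length = 0 := by
            have : k + 1 = orig.length := by omega
            simp [this]
          by_cases hc : 0 < k ∧ movB orig 0 = true
          · -- position 0 already vacated by the move at 0; pf blocks the wrap move
            have hr0 : row.getD 0 "" = "." := by rw [h4]; simp [hc]
            have hpf : pf = true := by rw [h6]; simp [hc.1, hc.2]
            have hmk : movB orig k = false := by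
              have h0gt : orig.getD 0 "" = ">" := by
                have := (Bool.and_eq_true .. ▸ hc.2).1; simpa [movB] using this
              unfold movB; rw [hmod, h0gt]; simp
            simp only [hnxt, hr0, beq_self_eq_true, if_true]
            rw [if_pos ⟨by omega, hpf⟩]
            subst hn0
            simp [moveEastLoopA, List.any_cons, hmk]
          · have hr0 : row.getD 0 "" = orig.getD 0 "" := by rw [h4]; simp [hc]
            have hpf : pf = false := by
              rw [h6]; rcases Nat.eq_zero_or_pos k with h | h
              · simp [h]
              · have : movB orig 0 = false := by
                  cases hm : movB orig 0
                  · rfl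
                  · exact absurd ⟨h, hm⟩ hc
                simp [this]
            have hmk : movB orig k = (orig.getD 0 "" == ".") := by
              unfold movB; rw [hmod, hgt]; simp
            simp only [hnxt, hr0]
            by_cases hdot : orig.getD 0 "" = "."
            · have hmkT : movB orig k = true := by rw [hmk, hdot]; simp
              simp only [hdot, beq_self_eq_true, if_true]
              rw [if_neg (by simp [hpf])]
              subst hn0
              simp [moveEastLoopA, List.any_cons, hmkT]
            · have hmkF : movB orig k = false := by
                rw [hmk]; exact beq_eq_false_iff_ne.mpr hdot
              rw [if_neg (by simpa using hdot)]
              subst hn0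
              simp [moveEastLoopA, List.any_cons, hmkF]
        · -- interior column: nxt = k+1
          have hk1 : k + 1 < orig.length := by omega
          have hnxt : (if (k : Int) = (orig.length : Int) - 1 then 0 else k + 1) = k + 1 := by
            rw [if_neg (by omega)]
          have hrk1 : row.getD (k + 1) "" = orig.getD (k + 1) "" := h2 (k + 1) (by omega)
          have hmk : movB orig k = (orig.getD (k + 1) "" == ".") := by
            unfold movB; rw [Nat.mod_eq_of_lt hk1, hgt]; simp
          simp only [hnxt, hrk1]
          by_cases hdot : orig.getD (k + 1) "" = "."
          · simp only [hdot, beq_self_eq_true, if_true]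
            rw [if_neg (by rintro ⟨h, -⟩; omega)]
            have hmkT : movB orig k = true := by rw [hmk, hdot]; simp
            set row' := (row.set k ".").set (k + 1) ">" with hrow'
            have hget' : ∀ j, k + 1 < j → row'.getD j "" = orig.getD j "" := by
              intro j hj
              have : row'.getD j "" = row.getD j "" := by
                simp only [hrow', List.getD, List.getElem?_set]
                rw [if_neg (by omega), if_neg (by omega)]
              rw [this]; exact h2 j (by omega)
            have hget0 : row'.getD 0 "" =
                (if 0 < k + 1 ∧ movB orig 0 = true then "." else orig.getD 0 "") := by
              rcases Nat.eq_zero_or_pos k with h0 | h0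
              · subst h0
                have hr'0 : row'.getD 0 "" = "." := by
                  simp only [hrow', List.getD, List.getElem?_set]
                  simp [hlen, hkw]
                rw [hr'0, if_pos ⟨Nat.zero_lt_one, hmkT⟩]
              · have : row'.getD 0 "" = row.getD 0 "" := by
                  simp only [hrow', List.getD, List.getElem?_set]
                  rw [if_neg (by omega), if_neg (by omega)]
                rw [this, h4]
                by_cases hm0 : movB orig 0 = true
                · simp [h0, hm0]
                · simp [hm0]
            rw [ih (k + 1) row' true (if k = 0 then true else pf) true (by omega)
                (by simp [hrow', hlen]) hget' (by intro h; exact absurd h (by simp))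
                hget0 (by simp [hmkT]) ?_]
            · simp [List.any_cons, hmkT]
            · rcases Nat.eq_zero_or_pos k with h0 | h0
              · subst h0; simp; rw [← hmkT]
              · rw [if_neg (by omega), h6]; simp [h0]
          · rw [if_neg (by simpa using hdot)]
            have hmkF : movB orig k = false := by
              rw [hmk]; exact beq_eq_false_iff_ne.mpr hdot
            have hm0 : 0 < k ∨ movB orig 0 = false := by
              rcases Nat.eq_zero_or_pos k with h0 | h0
              · right; rw [h0] at hmkF; exact hmkF
              · left; exact h0
            rw [ih (k + 1) row false pf inm (by omega) hlen
                (fun j hj => h2 j (by omega)) (fun _ => h2 (k + 1) (by omega))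
                (by rcases hm0 with h0 | hm
                    · rw [h4]; by_cases hmv : movB orig 0 = true <;> simp [h0, hmv]
                    · rw [h4]; simp [hm])
                (by simp [hmkF])
                (by rcases hm0 with h0 | hm
                    · rw [h6]; simp [h0]
                    · rw [h6]; simp [hm])]
            simp [List.any_cons, hmkF]
      · -- not a '>': nothing happens
        have hmk : movB orig k = false := by
          unfold movB
          cases hb : (orig.getD k "" == ">") with
          | false => simp
          | true => exact absurd (by simpa using hb) hgt
        have hm0 : 0 < k ∨ movB orig 0 = false := by
          rcases Nat.eq_zero_or_pos k with h0 | h0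
          · right; rw [h0] at hmk; exact hmk
          · left; exact h0
        rw [if_neg (by rw [hrowk]; simpa using hgt)]
        rw [ih (k + 1) row false pf inm (by omega) hlen
            (fun j hj => h2 j (by omega)) (fun _ => h2 (k + 1) (by omega))
            (by rcases hm0 with h0 | hm
                · rw [h4]; by_cases hmv : movB orig 0 = true <;> simp [h0, hmv]
                · rw [h4]; simp [hm])
            (by simp [hmk])
            (by rcases hm0 with h0 | hm
                · rw [h6]; simp [h0]
                · rw [h6]; simp [hm])]
        simp [List.any_cons, hmk]

lemma moveEastLoopA_row (w : Nat) (orig : List String) (inm : Bool) (hw : w = orig.length) :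
    moveEastLoopA w (List.range orig.length) orig false false inm
      = (inm || (List.range orig.length).any (movB orig)) := by
  subst hw
  rw [List.range_eq_range']
  exact moveEastLoopA_inv orig orig.length 0 orig false false inm (by omega) rfl
    (fun _ _ => rfl) (fun _ => rfl) (by simp) (by simp) (by simp)

lemma foldl_rows_eq (w : Nat) :
    ∀ (rows : List (List String)) (inm : Bool), (∀ r ∈ rows, r.length = w) →
      rows.foldl (fun inm row => moveEastLoopA w (List.range row.length) row false false inm) inm
        = rows.foldl (fun inm row =>
            if ((List.range row.length).filter
              (fun j => row.getD j "" == ">" && row.getD ((j + 1) % w) "" == ".")).isEmpty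
            then inm else true) inm := by
  intro rows
  induction rows with
  | nil => intro inm _; rfl
  | cons r t ih =>
    intro inm hlen
    have hr : r.length = w := hlen r (List.mem_cons_self ..)
    simp only [List.foldl_cons]
    rw [show List.range r.length = List.range r.length from rfl,
      moveEastLoopA_row w r inm hr.symm,
      ih _ (fun x hx => hlen x (List.mem_cons_of_mem _ hx))]
    have hpred : (fun j => r.getD j "" == ">" && r.getD ((j + 1) % w) "" == ".") = movB r := by
      funext j; unfold movB; rw [hr]
    have hacc : (inm || (List.range r.length).any (movB r)) =
        (if ((List.range r.length).filter
            (fun j => r.getD j "" == ">" && r.getD ((j + 1) % w) "" == ".")).isEmpty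
          then inm else true) := by
      rw [filter_isEmpty_eq_not_any, hpred]
      cases h : (List.range r.length).any (movB r) <;> simp_all
    rw [hacc]

-- no ">" cell: A's row loop never moves and returns its accumulator unchanged
lemma loopA_no_gt (w : Nat) (row : List String) (h : ∀ c ∈ row, c ≠ ">") :
    ∀ (l : List Nat) (pf inm : Bool), (∀ i ∈ l, i < row.length) →
      moveEastLoopA w l row false pf inm = inm := by
  intro l
  induction l with
  | nil => intro pf inm _; rfl
  | cons i t ih =>
    intro pf inm hl
    have hi : i < row.length := hl i (List.mem_cons_self ..)
    have hne : row.getD i "" ≠ ">" := by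
      rw [List.getD_eq_getElem _ _ hi]; exact h _ (List.getElem_mem hi)
    have hb : (row.getD i "" == ">") = false := beq_eq_false_iff_ne.mpr hne
    simp only [moveEastLoopA, Bool.false_eq_true, if_false, hb]
    exact ih pf inm (fun x hx => hl x (List.mem_cons_of_mem _ hx))

-- no ">" cell: B's movable list is empty for every row
lemma movable_no_gt (w : Nat) (row : List String) (h : ∀ c ∈ row, c ≠ ">") :
    ((List.range row.length).filter
      (fun j => row.getD j "" == ">" && row.getD ((j + 1) % w) "" == ".")).isEmpty = true := by
  rw [List.isEmpty_iff, List.filter_eq_nil_iff]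
  intro j hj
  have hjlt : j < row.length := List.mem_range.mp hj
  have hne : row.getD j "" ≠ ">" := by
    rw [List.getD_eq_getElem _ _ hjlt]; exact h _ (List.getElem_mem hjlt)
  have hb : (row.getD j "" == ">") = false := beq_eq_false_iff_ne.mpr hne
  simp only [hb, Bool.false_and]
  simp

lemma foldl_rows_no_gt (w : Nat) :
    ∀ (rows : List (List String)) (inm : Bool), (∀ r ∈ rows, ∀ c ∈ r, c ≠ ">") →
      rows.foldl (fun inm row => moveEastLoopA w (List.range row.length) row false false inm) inm
        = rows.foldl (fun inm row =>
            if ((List.range row.length).filter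
              (fun j => row.getD j "" == ">" && row.getD ((j + 1) % w) "" == ".")).isEmpty
            then inm else true) inm := by
  intro rows
  induction rows with
  | nil => intro inm _; rfl
  | cons r t ih =>
    intro inm hno
    have hr : ∀ c ∈ r, c ≠ ">" := hno r (List.mem_cons_self ..)
    simp only [List.foldl_cons]
    rw [loopA_no_gt w r hr _ false inm (fun i hi => List.mem_range.mp hi),
      movable_no_gt w r hr, if_pos rfl]
    exact ih inm (fun x hx => hno x (List.mem_cons_of_mem _ hx))

-- ===== VERDICT (by name: the statement is the Claim_ definition above) =====
theorem move_east_spec : Claim_equal_move_east := by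
  intro data _ hpre
  unfold Spec_move_east move_east move_east_alt
  rcases hpre with hrect | hno
  · exact foldl_rows_eq (data.headD []).length data false hrect
  · exact foldl_rows_no_gt (data.headD []).length data false hno
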